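-- pv_equiv track=rewrite | github.com/kumarPint00/assist-ten | BE/app/api/admin_skill_extraction.py | filter_cv_by_skills
-- ===== SOURCE A (Python) =====
-- from typing import List, Dict, Optional, Tuple
--
-- def filter_cv_by_skills(redacted_cv: str, jd_skills: List[str]) -> str:
--     """
--     Create a JD-filtered version of CV that highlights relevant skills and experience.
--
--     This function:
--     1. Keeps the complete CV structure and formatting
--     2. Highlights sections relevant to JD skills
--     3. Marks sections with skill matches for easy scanning
--     4. Preserves all original content (no deletion)
--
--     Returns the CV with annotations for skill-relevant sections.
--     """
--     if not jd_skills or not redacted_cv: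
--         return redacted_cv
--
--     skill_keywords = {s.lower() for s in jd_skills}
--     lines = redacted_cv.splitlines()
--     filtered_lines = []
--
--     # Common CV section headers
--     section_headers = {
--         "experience", "work experience", "professional experience",
--         "skills", "technical skills", "core competencies", "expertise",
--         "education", "academic", "certifications",
--         "projects", "portfolio", "achievements",
--         "languages", "summary", "objective", "profile"
--     }
--
--     # Sections that are always important (never skip)
--     always_include_sections = {
--         "skills", "technical skills", "core competencies",
--         "education", "academic", "certifications", "certificates",
--         "summary", "objective", "profile"
--     }
--
--     current_section = None
--     section_has_match = False
--     buffered_section = []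
--
--     for line in lines:
--         low = line.lower().strip()
--
--         # Check if this is a section header
--         is_section_header = any(header in low for header in section_headers)
--
--         if is_section_header:
--             # Flush previous section based on criteria
--             if buffered_section:
--                 should_include = (
--                     section_has_match or
--                     current_section in always_include_sections or
--                     current_section and any(h in current_section for h in ["experience", "work"])
--                 )
--                 if should_include:
--                     filtered_lines.extend(buffered_section)
--
--             # Start new section
--             buffered_section = [line]
--             current_section = low
--             section_has_match = False
--             continue
--
--         # Add line to current section buffer
--         buffered_section.append(line)
--
--         # Check if line contains any JD skill keywords
--         if not section_has_match and any(k in low for k in skill_keywords):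
--             section_has_match = True
--
--     # Flush the last section
--     if buffered_section:
--         should_include = (
--             section_has_match or
--             current_section in always_include_sections or
--             current_section and any(h in current_section for h in ["experience", "work"])
--         )
--         if should_include:
--             filtered_lines.extend(buffered_section)
--
--     result = "\n".join(filtered_lines).strip()
--
--     # If nothing matched, return the original CV (don't return empty)
--     return result if result else redacted_cv
-- ===== SOURCE B (Python) =====
-- from typing import List
--
-- SECTION_HEADERS = [
--     "experience", "work experience", "professional experience",
--     "skills", "technical skills", "core competencies", "expertise",
--     "education", "academic", "certifications",
--     "projects", "portfolio", "achievements",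
--     "languages", "summary", "objective", "profile",
-- ]
--
-- ALWAYS_INCLUDE = [
--     "skills", "technical skills", "core competencies",
--     "education", "academic", "certifications", "certificates",
--     "summary", "objective", "profile",
-- ]
--
--
-- def filter_cv_by_skills(redacted_cv: str, jd_skills: List[str]) -> str:
--     if not jd_skills or not redacted_cv:
--         return redacted_cv
--
--     keywords = [s.lower() for s in jd_skills]
--
--     # Phase 1: split the CV into sections (header_low_or_None, body_lines, has_match).
--     sections = []
--     header, body, matched = None, [], False
--     for line in redacted_cv.splitlines():
--         low = line.lower().strip()
--         if any(h in low for h in SECTION_HEADERS):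
--             sections.append((header, body, matched))
--             header, body, matched = low, [line], False
--         else:
--             body = body + [line]
--             matched = matched or any(k in low for k in keywords)
--     sections.append((header, body, matched))
--
--     # Phase 2: keep every section passing the include predicate.
--     kept = []
--     for header, body, matched in sections:
--         include = (
--             matched
--             or header in ALWAYS_INCLUDE
--             or (header is not None and any(h in header for h in ["experience", "work"]))
--         )
--         if include:
--             kept = kept + body
--
--     result = "\n".join(kept).strip()
--     return result if result else redacted_cv
-- ===== Notes on version B (the rewrite author's own statement) =====
-- stated objective: alternative
-- what changed: A streams through the lines with a buffered current section flushed inline at each header and once at the end; B is a two-phase decomposition that first splits the CV into an explicit list of (header, body, match-flag) sections and then filters that list with the include predicate.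
import Mathlib
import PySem

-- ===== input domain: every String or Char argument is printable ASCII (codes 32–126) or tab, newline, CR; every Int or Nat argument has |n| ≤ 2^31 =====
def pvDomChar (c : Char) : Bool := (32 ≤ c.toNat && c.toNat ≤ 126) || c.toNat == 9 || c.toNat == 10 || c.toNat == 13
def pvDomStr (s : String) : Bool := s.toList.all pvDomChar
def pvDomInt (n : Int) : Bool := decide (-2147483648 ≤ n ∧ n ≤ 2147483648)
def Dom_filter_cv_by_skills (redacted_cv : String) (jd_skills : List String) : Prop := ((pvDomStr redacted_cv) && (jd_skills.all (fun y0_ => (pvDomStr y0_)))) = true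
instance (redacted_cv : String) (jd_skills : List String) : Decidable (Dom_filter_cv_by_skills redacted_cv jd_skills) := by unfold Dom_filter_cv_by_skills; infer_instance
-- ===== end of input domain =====

-- B replaces A's single streaming pass with inline flushes by a two-phase
-- decomposition: phase 1 splits the CV into sections (header?, body, match-flag),
-- phase 2 filters that section list with the include predicate (objective: alternative).

-- Constants shared by both Python versions (the section-header and always-include sets).
def pvSectionHeaders : List String :=
  ["experience", "work experience", "professional experience",
   "skills", "technical skills", "core competencies", "expertise",
   "education", "academic", "certifications",
   "projects", "portfolio", "achievements",
   "languages", "summary", "objective", "profile"]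

def pvAlwaysInclude : List String :=
  ["skills", "technical skills", "core competencies",
   "education", "academic", "certifications", "certificates",
   "summary", "objective", "profile"]

def pvIsHeader (low : String) : Bool := pvSectionHeaders.any (fun h => PySem.Str.isIn h low)

def pvHasKw (kws : List String) (low : String) : Bool := kws.any (fun k => PySem.Str.isIn k low)

-- should_include: section_has_match or current_section in always_include_sections or
-- (current_section and any(h in current_section for h in ["experience","work"]))
-- (current_section = None makes both the membership test and the truthiness test falsy).
def pvInclude (cs : Option String) (m : Bool) : Bool :=
  m || (match cs with
        | none => false
        | some s => pvAlwaysInclude.contains s)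
    || (match cs with
        | none => false
        | some s => ["experience", "work"].any (fun h => PySem.Str.isIn h s))

-- ===== PORT A =====
-- A's flush block (it appears verbatim twice in the Python: in the loop and at the end):
-- 'if buffered_section: if should_include: filtered_lines.extend(buffered_section)'
-- on the state (current_section, section_has_match, buffered_section, filtered_lines).
def pvFlush (st : Option String × Bool × List String × List String) : List String :=
  if st.2.2.1.isEmpty then st.2.2.2
  else if pvInclude st.1 st.2.1 then st.2.2.2 ++ st.2.2.1 else st.2.2.2

-- One iteration of A's loop body ('low' = line.lower().strip(), written out inline).
def pvStepA (kws : List String) (st : Option String × Bool × List String × List String)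
    (line : String) : Option String × Bool × List String × List String :=
  if pvIsHeader (PySem.Str.strip (PySem.Str.lower line)) then
    (some (PySem.Str.strip (PySem.Str.lower line)), false, [line], pvFlush st)
  else
    (st.1,
     (if !st.2.1 && pvHasKw kws (PySem.Str.strip (PySem.Str.lower line)) then true else st.2.1),
     st.2.2.1 ++ [line], st.2.2.2)

def filter_cv_by_skills (redacted_cv : String) (jd_skills : List String) : String :=
  if jd_skills.isEmpty || PySem.Str.len redacted_cv == 0 then redacted_cv
  else
    let kws : List String := PySem.Set.ofList (jd_skills.map PySem.Str.lower)
    let st := (PySem.Str.splitlines redacted_cv).foldl (pvStepA kws) (none, false, [], [])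
    let result := PySem.Str.strip (PySem.Str.join "\n" (pvFlush st))
    if PySem.Str.len result == 0 then redacted_cv else result

-- ===== PORT B =====
-- Phase 1: split the lines into sections (header-low-or-none, body lines, has-match).
def pvBuild (kws : List String) : List String → Option String × List String × Bool →
    List (Option String × List String × Bool)
  | [], cur => [cur]
  | l :: rest, cur =>
    if pvIsHeader (PySem.Str.strip (PySem.Str.lower l)) then
      cur :: pvBuild kws rest (some (PySem.Str.strip (PySem.Str.lower l)), [l], false)
    else
      pvBuild kws rest
        (cur.1, cur.2.1 ++ [l], cur.2.2 || pvHasKw kws (PySem.Str.strip (PySem.Str.lower l)))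

-- Phase 2: keep the bodies of the sections passing the include predicate.
def pvKeep (sections : List (Option String × List String × Bool)) : List String :=
  sections.foldl (fun kept s => if pvInclude s.1 s.2.2 then kept ++ s.2.1 else kept) []

def filter_cv_by_skills_alt (redacted_cv : String) (jd_skills : List String) : String :=
  if jd_skills.isEmpty || PySem.Str.len redacted_cv == 0 then redacted_cv
  else
    let kws := jd_skills.map PySem.Str.lower
    let sections := pvBuild kws (PySem.Str.splitlines redacted_cv) (none, [], false)
    let result := PySem.Str.strip (PySem.Str.join "\n" (pvKeep sections))
    if PySem.Str.len result == 0 then redacted_cv else result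

-- ===== PRECONDITION & SPEC =====
def Spec_filter_cv_by_skills (redacted_cv : String) (jd_skills : List String) (out : String) : Prop := out = filter_cv_by_skills_alt redacted_cv jd_skills
instance (redacted_cv : String) (jd_skills : List String) (out : String) : Decidable (Spec_filter_cv_by_skills redacted_cv jd_skills out) := by unfold Spec_filter_cv_by_skills; infer_instance

-- ===== CLAIM (what is proved, stated in full; the proofs are below) =====
def Claim_equal_filter_cv_by_skills : Prop := ∀ (redacted_cv : String) (jd_skills : List String), Dom_filter_cv_by_skills redacted_cv jd_skills → Spec_filter_cv_by_skills redacted_cv jd_skills (filter_cv_by_skills redacted_cv jd_skills)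

-- ===== LEMMAS AND PROOFS =====

-- `any` over the deduplicated keyword set equals `any` over the raw keyword list.
lemma hasKw_set (jd : List String) (low : String) :
    pvHasKw (PySem.Set.ofList (jd.map PySem.Str.lower)) low
      = pvHasKw (jd.map PySem.Str.lower) low := by
  unfold pvHasKw
  rw [Bool.eq_iff_iff]
  simp only [List.any_eq_true]
  constructor
  · rintro ⟨k, hk, h⟩
    exact ⟨k, (PySem.Set.mem_ofList _ _).1 hk, h⟩
  · rintro ⟨k, hk, h⟩
    exact ⟨k, (PySem.Set.mem_ofList _ _).2 hk, h⟩

-- pvBuild over the deduplicated keyword set equals pvBuild over the raw keyword list.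
lemma build_set (jd : List String) (lines : List String)
    (cur : Option String × List String × Bool) :
    pvBuild (PySem.Set.ofList (jd.map PySem.Str.lower)) lines cur
      = pvBuild (jd.map PySem.Str.lower) lines cur := by
  induction lines generalizing cur with
  | nil => rfl
  | cons l rest ih => simp only [pvBuild, hasKw_set, ih]

-- A's step on a header / non-header line, with the match-flag update simplified.
lemma stepA_pos (kws : List String) (st : Option String × Bool × List String × List String)
    (l : String) (hh : pvIsHeader (PySem.Str.strip (PySem.Str.lower l)) = true) :
    pvStepA kws st l = (some (PySem.Str.strip (PySem.Str.lower l)), false, [l], pvFlush st) := by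
  simp [pvStepA, hh]

lemma stepA_neg (kws : List String) (st : Option String × Bool × List String × List String)
    (l : String) (hh : pvIsHeader (PySem.Str.strip (PySem.Str.lower l)) = false) :
    pvStepA kws st l
      = (st.1, st.2.1 || pvHasKw kws (PySem.Str.strip (PySem.Str.lower l)),
         st.2.2.1 ++ [l], st.2.2.2) := by
  simp only [pvStepA, hh, Bool.false_eq_true, if_false]
  cases h : st.2.1 <;> simp

-- pvKeep started from an arbitrary accumulator.
lemma keep_init (init : List String) (ss : List (Option String × List String × Bool)) :
    ss.foldl (fun kept s => if pvInclude s.1 s.2.2 then kept ++ s.2.1 else kept) init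
      = init ++ pvKeep ss := by
  induction ss generalizing init with
  | nil => simp [pvKeep]
  | cons s ss ih =>
    unfold pvKeep
    simp only [List.foldl_cons]
    rw [ih, ih (if pvInclude s.1 s.2.2 then [] ++ s.2.1 else [])]
    by_cases h : pvInclude s.1 s.2.2 <;> simp [h]

-- pvKeep on a cons: the head section's contribution in front.
lemma keep_cons (s : Option String × List String × Bool)
    (ss : List (Option String × List String × Bool)) :
    pvKeep (s :: ss) = (if pvInclude s.1 s.2.2 then s.2.1 else []) ++ pvKeep ss := by
  unfold pvKeep
  rw [List.foldl_cons, keep_init]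
  by_cases h : pvInclude s.1 s.2.2 <;> simp [h, pvKeep]

-- Core invariant: A's streaming loop plus the final flush computes the same line
-- list as B's phase 1 (seeded with the same current section) followed by phase 2.
@[simp] lemma loop_eq (kws : List String) (lines : List String)
    (cs : Option String) (m : Bool) (buf acc : List String) :
    pvFlush (lines.foldl (pvStepA kws) (cs, m, buf, acc))
      = acc ++ pvKeep (pvBuild kws lines (cs, buf, m)) := by
  induction lines generalizing cs m buf acc with
  | nil =>
    unfold pvFlush pvBuild pvKeep
    cases buf <;> by_cases h : pvInclude cs m <;> simp [h]
  | cons l rest ih =>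
    rw [List.foldl_cons]
    by_cases hh : pvIsHeader (PySem.Str.strip (PySem.Str.lower l)) = true
    · rw [stepA_pos kws _ l hh, ih]
      simp only [pvBuild, hh, if_true]
      rw [keep_cons]
      unfold pvFlush
      cases buf <;> by_cases h : pvInclude cs m <;> simp [h]
    · have hh' : pvIsHeader (PySem.Str.strip (PySem.Str.lower l)) = false := by
        simpa using hh
      rw [stepA_neg kws _ l hh', ih]
      simp only [pvBuild, hh', Bool.false_eq_true, if_false]

-- ===== VERDICT (by name: the statement is the Claim_ definition above) =====
theorem filter_cv_by_skills_spec : Claim_equal_filter_cv_by_skills := by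
  intro cv jd _
  unfold Spec_filter_cv_by_skills
  simp only [filter_cv_by_skills, filter_cv_by_skills_alt, loop_eq, List.nil_append, build_set]
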